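-- pv_equiv track=rewrite | github.com/Daho0980/Rudventure | Game/utils/graphics/animation.py | SOAD
-- ===== SOURCE A (Python) =====
-- def SOAD(length:int) -> list[int]:
--     """
--     ### Super Out Animation Division function.
--     """
--     output = []
--
--     while True:
--         if length == 1: output.append(1); break
--
--         if length%2: output.append(int(length/2)+1)
--         else:        output.append(int(length/2))
--         length = int(length/2)
--
--     return output
-- ===== SOURCE B (Python) =====
-- def SOAD(length: int) -> list[int]:
--     # Closed form over bit positions: the k-th emitted value is
--     # (length >> (k+1)) + ((length >> k) & 1), for k = 0 .. length.bit_length()-1.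
--     return [(length >> (k + 1)) + ((length >> k) & 1)
--             for k in range(length.bit_length())]
-- ===== Notes on version B (the rewrite author's own statement) =====
-- stated objective: alternative
-- what changed: B replaces A's halving while-loop with a loopless closed form: the k-th element is (length >> (k+1)) + ((length >> k) & 1) for k ranging over range(length.bit_length()), so no running variable is halved at all; Pre_ excludes length <= 0, where A loops forever while B naturally returns (e.g. [] at 0).
-- outside the precondition, e.g. on SOAD(0): A does not finish within the time limit, B returns []
import Mathlib
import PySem

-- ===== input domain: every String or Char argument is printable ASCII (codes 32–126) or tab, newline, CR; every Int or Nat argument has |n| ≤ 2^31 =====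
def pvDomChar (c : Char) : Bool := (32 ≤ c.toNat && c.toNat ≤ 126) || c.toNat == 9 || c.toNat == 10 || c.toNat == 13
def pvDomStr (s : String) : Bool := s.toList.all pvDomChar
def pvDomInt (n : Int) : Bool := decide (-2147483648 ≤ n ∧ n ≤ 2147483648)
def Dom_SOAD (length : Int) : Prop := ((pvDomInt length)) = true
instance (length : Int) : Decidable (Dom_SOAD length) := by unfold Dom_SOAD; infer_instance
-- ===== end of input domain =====

-- B replaces A's halving while-loop by a loopless bit-position closed form (alternative algorithm, same cost).
-- A loops forever for length ≤ 0; Pre_ excludes those inputs.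


-- ===== PORT A =====
-- A's while-loop as structural recursion; the 'length ≤ 0' guard only makes the
-- loop total in Lean (Python diverges there; such inputs are outside Pre_SOAD).
-- On positive ints Python's int(length/2) equals floor division.
def SOAD (length : Int) : List Int :=
  if length = 1 then [1]
  else if length ≤ 0 then []
  else
    (if PySem.Int.mod length 2 ≠ 0 then PySem.Int.floordiv length 2 + 1
     else PySem.Int.floordiv length 2) :: SOAD (PySem.Int.floordiv length 2)
termination_by length.toNat
decreasing_by
  have h2 : (0:Int) < 2 := by omega
  rw [PySem.Int.floordiv_eq_ediv_of_pos h2]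
  omega

-- ===== PORT B =====
-- Source B's length.bit_length(): 0 at 0, else number of bits of |length|
def pyBitLength (n : Int) : Nat :=
  if n = 0 then 0 else Nat.log2 n.natAbs + 1

-- Source B's comprehension; '>> m' is floor division by 2^m and '& 1' is mod 2,
-- exact for Python ints of either sign.
def SOAD_alt (length : Int) : List Int :=
  (List.range (pyBitLength length)).map
    (fun k => PySem.Int.floordiv length (2 ^ (k + 1))
              + PySem.Int.mod (PySem.Int.floordiv length (2 ^ k)) 2)

-- ===== PRECONDITION & SPEC =====
-- Pre_ excludes length ≤ 0, on which the Python A never terminates.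
def Pre_SOAD (length : Int) : Prop := 1 ≤ length
instance (length : Int) : Decidable (Pre_SOAD length) := by unfold Pre_SOAD; infer_instance
def pvWitness_SOAD : Int := 7
def Spec_SOAD (length : Int) (out : List Int) : Prop := out = SOAD_alt length
instance (length : Int) (out : List Int) : Decidable (Spec_SOAD length out) := by unfold Spec_SOAD; infer_instance

-- ===== CLAIM (what is proved, stated in full; the proofs are below) =====
def Claim_equal_SOAD : Prop := ∀ (length : Int), Dom_SOAD length → Pre_SOAD length → Spec_SOAD length (SOAD length)

-- ===== LEMMAS AND PROOFS =====
lemma floordiv_floordiv_two (n : Int) (k : Nat) :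
    PySem.Int.floordiv (PySem.Int.floordiv n 2) (2 ^ k) = PySem.Int.floordiv n (2 ^ (k + 1)) := by
  have h2 : (0:Int) < 2 := by omega
  have hk : (0:Int) < 2 ^ k := by positivity
  have hk1 : (0:Int) < 2 ^ (k + 1) := by positivity
  rw [PySem.Int.floordiv_eq_ediv_of_pos h2, PySem.Int.floordiv_eq_ediv_of_pos hk,
      PySem.Int.floordiv_eq_ediv_of_pos hk1, Int.ediv_ediv_of_nonneg (by omega : (0:Int) ≤ 2)]
  congr 1
  rw [pow_succ]
  ring

lemma bitLength_step (n : Int) (h : 2 ≤ n) :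
    pyBitLength n = pyBitLength (PySem.Int.floordiv n 2) + 1 := by
  have h2 : (0:Int) < 2 := by omega
  rw [PySem.Int.floordiv_eq_ediv_of_pos h2]
  unfold pyBitLength
  have hne : n ≠ 0 := by omega
  have hne2 : n / 2 ≠ 0 := by omega
  rw [if_neg hne, if_neg hne2]
  have hnat : (n / 2).natAbs = n.natAbs / 2 := by
    omega
  rw [hnat, Nat.log2_eq_log_two, Nat.log2_eq_log_two, Nat.log_div_base]
  have hpos : 0 < Nat.log 2 n.natAbs := Nat.log_pos (by omega) (by omega)
  omega

lemma SOAD_alt_one : SOAD_alt 1 = [1] := by decide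

lemma SOAD_alt_step (n : Int) (h : 2 ≤ n) :
    SOAD_alt n = (PySem.Int.floordiv n 2 + PySem.Int.mod n 2)
                 :: SOAD_alt (PySem.Int.floordiv n 2) := by
  unfold SOAD_alt
  rw [bitLength_step n h, List.range_succ_eq_map, List.map_cons, List.map_map]
  refine congrArg₂ _ (by norm_num) ?_
  refine List.map_congr_left (fun k _ => ?_)
  simp only [Function.comp_apply]
  rw [← floordiv_floordiv_two n k, ← floordiv_floordiv_two n (k + 1)]

lemma SOAD_eq_alt (length : Int) (h : 1 ≤ length) : SOAD length = SOAD_alt length := by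
  induction length using SOAD.induct with
  | case1 => rw [SOAD_alt_one, SOAD]; simp
  | case2 x h1 h0 => exact absurd h (by omega)
  | case3 x h1 h0 ih =>
    have h2 : (0:Int) < 2 := by omega
    have hx2 : 2 ≤ x := by omega
    have hx : (1:Int) ≤ PySem.Int.floordiv x 2 := by
      rw [PySem.Int.floordiv_eq_ediv_of_pos h2]; omega
    rw [SOAD, if_neg h1, if_neg h0, SOAD_alt_step x hx2, ih hx]
    refine congrArg₂ _ ?_ rfl
    -- A's parity-split head equals floor(x/2) + x%2
    rw [PySem.Int.mod_eq_emod_of_pos h2]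
    rcases Int.emod_two_eq x with he | he <;> simp [he]

-- ===== VERDICT (by name: the statement is the Claim_ definition above) =====
theorem SOAD_spec : Claim_equal_SOAD := by
  intro length _ hpre
  exact SOAD_eq_alt length hpre
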